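-- pv_equiv track=rewrite | github.com/YovelR/NandToTetris | Assembler.py | space_filter
-- ===== SOURCE A (Python) =====
-- def space_filter(string):
--     new_string = ""
--     for char in string:
--         if char is '/':
--             break
--         if char not in ["\s", '\n', '\t', ' ']:
--             new_string = new_string + char
--     return new_string
-- ===== SOURCE B (Python) =====
-- def space_filter(string):
--     head = string.split('/', 1)[0]
--     return ''.join(c for c in head if c not in ('\n', '\t', ' '))
-- ===== Notes on version B (the rewrite author's own statement) =====
-- stated objective: simpler
-- what changed: Replaces the fused break+filter character loop (with its inert two-character '\s' list entry) by two plain passes: a split that keeps the prefix before the first slash, then a join of a filtering comprehension over that prefix.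
import Mathlib
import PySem

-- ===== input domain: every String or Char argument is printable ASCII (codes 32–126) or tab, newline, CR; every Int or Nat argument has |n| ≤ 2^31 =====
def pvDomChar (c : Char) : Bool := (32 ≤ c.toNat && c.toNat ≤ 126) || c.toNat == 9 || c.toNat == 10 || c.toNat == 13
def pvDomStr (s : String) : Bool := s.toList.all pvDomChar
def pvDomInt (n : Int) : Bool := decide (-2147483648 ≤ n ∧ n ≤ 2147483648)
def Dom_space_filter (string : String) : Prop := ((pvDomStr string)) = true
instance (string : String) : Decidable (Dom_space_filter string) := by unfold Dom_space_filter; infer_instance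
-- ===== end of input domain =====

-- B replaces A's fused break+filter loop by split-at-first-slash then filter whitespace (objective: simpler); same return value on every input.
-- ===== PORT A =====
-- literal transliteration of A: loop over the characters, break at '/', append non-whitespace
-- (the "\s" list entry is the two-character string "\s": a single character never equals it, so it is inert)
def spaceFilterLoopA : List Char → List Char → List Char
  | [], acc => acc
  | c :: rest, acc =>
    if c = '/' then acc
    else if c = '\n' ∨ c = '\t' ∨ c = ' ' then spaceFilterLoopA rest acc
    else spaceFilterLoopA rest (acc ++ [c])

def space_filter (string : String) : String :=
  String.mk (spaceFilterLoopA string.toList [])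

-- ===== PORT B =====
-- B: head = string.split('/',1)[0] (= the prefix before the first '/'), then filter whitespace out of it
def space_filter_alt (string : String) : String :=
  String.mk (((string.toList.takeWhile (fun c => c ≠ '/')).filter
    (fun c => ¬ (c = '\n' ∨ c = '\t' ∨ c = ' '))))

-- ===== PRECONDITION & SPEC =====
def Spec_space_filter (string : String) (out : String) : Prop := out = space_filter_alt string
instance (string : String) (out : String) : Decidable (Spec_space_filter string out) := by unfold Spec_space_filter; infer_instance

-- ===== CLAIM (what is proved, stated in full; the proofs are below) =====
def Claim_equal_space_filter : Prop := ∀ (string : String), Dom_space_filter string → Spec_space_filter string (space_filter string)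

-- ===== LEMMAS AND PROOFS =====

-- ===== VERDICT (by name: the statement is the Claim_ definition above) =====
theorem spaceFilterLoopA_eq (l acc : List Char) :
    spaceFilterLoopA l acc =
      acc ++ (l.takeWhile (fun c => c ≠ '/')).filter
        (fun c => ¬ (c = '\n' ∨ c = '\t' ∨ c = ' ')) := by
  induction l generalizing acc with
  | nil => simp [spaceFilterLoopA]
  | cons c rest ih =>
    by_cases h : c = '/'
    · simp [spaceFilterLoopA, h, List.takeWhile]
    · by_cases hw : c = '\n' ∨ c = '\t' ∨ c = ' '
      · rcases hw with hw | hw | hw <;>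
          simp [spaceFilterLoopA, h, hw, ih, List.filter_cons]
      · push_neg at hw
        simp [spaceFilterLoopA, h, hw.1, hw.2.1, hw.2.2, ih, List.filter_cons]

theorem space_filter_spec : Claim_equal_space_filter := by
  intro s _
  unfold Spec_space_filter space_filter space_filter_alt
  rw [spaceFilterLoopA_eq]
  simp
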